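-- pv_equiv track=rewrite | github.com/shmitkokirill/system_engineering_2 | kdz1/main.py | vec_minimax_regret
-- ===== SOURCE A (Python) =====
-- def vec_minimax_regret(Matrix):
--     res = []
--     m_range = range(len(Matrix))
--     r_range = range(len(Matrix[0]))
--     for j in r_range:
--         max_1 = 0
--         max_2 = 0
--         for i in m_range:
--             pt = Matrix[i][j]
--             if pt[0] > max_1:
--                 max_1 = pt[0]
--             if pt[1] > max_2:
--                 max_2 = pt[1]
--         res.append([max_1, max_2])
--     return res
-- ===== SOURCE B (Python) =====
-- def vec_minimax_regret(Matrix):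
--     res = [[0, 0] for _ in Matrix[0]]
--     for row in Matrix:
--         res = [[p[0] if p[0] > c[0] else c[0],
--                 p[1] if p[1] > c[1] else c[1]]
--                for c, p in zip(res, row)]
--     return res
-- ===== Notes on version B (the rewrite author's own statement) =====
-- stated objective: alternative
-- what changed: Replaces A's column-major double loop (two scalar running maxima per column, re-scanning all rows for each column) with a single row-major pass that folds each row into a running list of per-column maxima via zip.
import Mathlib
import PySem

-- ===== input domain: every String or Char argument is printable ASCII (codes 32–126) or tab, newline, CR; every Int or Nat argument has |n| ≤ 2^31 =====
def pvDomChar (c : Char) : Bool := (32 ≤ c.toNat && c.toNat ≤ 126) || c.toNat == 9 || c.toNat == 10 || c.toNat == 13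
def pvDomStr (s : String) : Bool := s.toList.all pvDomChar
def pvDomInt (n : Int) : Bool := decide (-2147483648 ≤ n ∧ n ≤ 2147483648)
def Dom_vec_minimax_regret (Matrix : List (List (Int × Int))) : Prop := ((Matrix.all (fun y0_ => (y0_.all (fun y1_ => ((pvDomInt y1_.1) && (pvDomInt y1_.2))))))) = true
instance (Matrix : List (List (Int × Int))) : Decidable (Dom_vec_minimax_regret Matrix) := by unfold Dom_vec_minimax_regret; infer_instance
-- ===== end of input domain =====

-- B replaces A's column-major double loop by a single row-major fold over the rows
-- that maintains the whole list of per-column running maxima (objective: alternative).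

-- ===== PORT A =====
-- literal port of A: outer loop over columns j, inner loop over row indices i,
-- two scalar running maxima per column, appended to res
def vec_minimax_regret (Matrix : List (List (Int × Int))) : List (List Int) :=
  let m_range := PySem.List.pyRange 0 (PySem.List.len Matrix) 1
  let r_range := PySem.List.pyRange 0 (PySem.List.len (PySem.List.pyGetD Matrix 0 [])) 1
  r_range.foldl (fun res j =>
    let p := m_range.foldl (fun (m : Int × Int) i =>
      let pt := PySem.List.pyGetD (PySem.List.pyGetD Matrix i []) j (0, 0)
      let max_1 := if pt.1 > m.1 then pt.1 else m.1
      let max_2 := if pt.2 > m.2 then pt.2 else m.2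
      (max_1, max_2)) (0, 0)
    res ++ [[p.1, p.2]]) []

-- ===== PORT B =====
-- literal port of B: res starts as [[0,0]] per column, each row is folded in via zip
def vec_minimax_regret_alt (Matrix : List (List (Int × Int))) : List (List Int) :=
  let init := (PySem.List.pyGetD Matrix 0 []).map (fun _ => ([0, 0] : List Int))
  Matrix.foldl (fun res row =>
    (res.zip row).map (fun cp =>
      let c0 := PySem.List.pyGetD cp.1 0 0
      let c1 := PySem.List.pyGetD cp.1 1 0
      [if cp.2.1 > c0 then cp.2.1 else c0, if cp.2.2 > c1 then cp.2.2 else c1])) init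

-- ===== PRECONDITION & SPEC =====
-- Pre_ excludes exactly the inputs where Python A raises IndexError: the empty matrix
-- (Matrix[0]) and ragged matrices with a row shorter than row 0 (Matrix[i][j]).
def Pre_vec_minimax_regret (Matrix : List (List (Int × Int))) : Prop :=
  Matrix ≠ [] ∧ ∀ row ∈ Matrix, (Matrix.headD []).length ≤ row.length
instance (Matrix : List (List (Int × Int))) : Decidable (Pre_vec_minimax_regret Matrix) := by
  unfold Pre_vec_minimax_regret; infer_instance
def pvWitness_vec_minimax_regret : (List (List (Int × Int))) := [[(1, 2), (3, -1)], [(0, 5), (2, 2)]]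
def Spec_vec_minimax_regret (Matrix : List (List (Int × Int))) (out : List (List Int)) : Prop := out = vec_minimax_regret_alt Matrix
instance (Matrix : List (List (Int × Int))) (out : List (List Int)) : Decidable (Spec_vec_minimax_regret Matrix out) := by unfold Spec_vec_minimax_regret; infer_instance

-- ===== CLAIM (what is proved, stated in full; the proofs are below) =====
def Claim_equal_vec_minimax_regret : Prop := ∀ (Matrix : List (List (Int × Int))), Dom_vec_minimax_regret Matrix → Pre_vec_minimax_regret Matrix → Spec_vec_minimax_regret Matrix (vec_minimax_regret Matrix)

-- ===== LEMMAS AND PROOFS =====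

-- the common per-column update step
def pvStep (m pt : Int × Int) : Int × Int :=
  (if pt.1 > m.1 then pt.1 else m.1, if pt.2 > m.2 then pt.2 else m.2)

-- A's value: the j-th column's fold over the rows
lemma a_char (Matrix : List (List (Int × Int))) :
    vec_minimax_regret Matrix =
      (List.range (PySem.List.pyGetD Matrix 0 []).length).map (fun (j : Nat) =>
        let p := Matrix.foldl (fun m row => pvStep m (PySem.List.pyGetD row (j : Int) (0, 0))) (0, 0)
        [p.1, p.2]) := by
  unfold vec_minimax_regret
  have inner : ∀ j : Int,
      (PySem.List.pyRange 0 (PySem.List.len Matrix) 1).foldl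
        (fun (m : Int × Int) i =>
          let pt := PySem.List.pyGetD (PySem.List.pyGetD Matrix i []) j (0, 0)
          let max_1 := if pt.1 > m.1 then pt.1 else m.1
          let max_2 := if pt.2 > m.2 then pt.2 else m.2
          (max_1, max_2)) (0, 0)
      = Matrix.foldl (fun m row => pvStep m (PySem.List.pyGetD row j (0, 0))) (0, 0) := by
    intro j
    exact PySem.List.foldl_pyRange_zero_pyGetD Matrix []
      (fun m row => pvStep m (PySem.List.pyGetD row j (0, 0))) (0, 0)
  show (PySem.List.pyRange 0 (PySem.List.len (PySem.List.pyGetD Matrix 0 [])) 1).foldl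
      (fun res j => res ++ [_]) [] = _
  rw [PySem.List.foldl_append_singleton_eq_map]
  simp only [inner, List.nil_append]
  rw [show PySem.List.len (PySem.List.pyGetD Matrix 0 []) =
        (((PySem.List.pyGetD Matrix 0 []).length : Nat) : Int) from rfl,
      PySem.List.pyRange_zero_natCast, List.map_map]
  rfl

-- one row of B: zip with a map over range, pointwise
lemma b_row (k : Nat) (row : List (Int × Int)) (hk : k ≤ row.length) (f : Nat → Int × Int) :
    ((((List.range k).map (fun (j : Nat) => [(f j).1, (f j).2])).zip row).map (fun cp =>
        let c0 := PySem.List.pyGetD cp.1 0 0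
        let c1 := PySem.List.pyGetD cp.1 1 0
        [if cp.2.1 > c0 then cp.2.1 else c0, if cp.2.2 > c1 then cp.2.2 else c1]))
      = (List.range k).map (fun (j : Nat) =>
          let p := pvStep (f j) (PySem.List.pyGetD row (j : Int) (0, 0))
          [p.1, p.2]) := by
  apply List.ext_getElem
  · simp [Nat.min_eq_left hk]
  · intro j h1 h2
    have hjk : j < k := by simpa [Nat.min_eq_left hk] using h1
    have hget : row[j]? = some row[j] := List.getElem?_eq_getElem (by omega)
    simp only [List.getElem_map, List.getElem_zip, List.getElem_range]
    simp [pvStep, PySem.List.pyGetD, hget]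

-- B's fold invariant
lemma b_inv (rows : List (List (Int × Int))) (k : Nat) (h : ∀ r ∈ rows, k ≤ r.length)
    (f : Nat → Int × Int) :
    rows.foldl (fun res row =>
        (res.zip row).map (fun cp =>
          let c0 := PySem.List.pyGetD cp.1 0 0
          let c1 := PySem.List.pyGetD cp.1 1 0
          [if cp.2.1 > c0 then cp.2.1 else c0, if cp.2.2 > c1 then cp.2.2 else c1]))
      ((List.range k).map (fun (j : Nat) => [(f j).1, (f j).2]))
      = (List.range k).map (fun (j : Nat) =>
          let p := rows.foldl (fun m row => pvStep m (PySem.List.pyGetD row (j : Int) (0, 0))) (f j)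
          [p.1, p.2]) := by
  induction rows generalizing f with
  | nil => simp
  | cons r t ih =>
    simp only [List.foldl_cons]
    rw [b_row k r (h r (by simp)) f]
    exact ih (fun r hr => h r (by simp [hr]))
      (fun j => pvStep (f j) (PySem.List.pyGetD r (j : Int) (0, 0)))

-- ===== VERDICT (by name: the statement is the Claim_ definition above) =====
theorem vec_minimax_regret_spec : Claim_equal_vec_minimax_regret := by
  intro Matrix hDom hPre
  obtain ⟨hne, hlen⟩ := hPre
  unfold Spec_vec_minimax_regret vec_minimax_regret_alt
  have hhead : PySem.List.pyGetD Matrix 0 [] = Matrix.headD [] := by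
    cases Matrix with
    | nil => exact absurd rfl hne
    | cons a t => simp [PySem.List.pyGetD, PySem.List.pyGet?, PySem.List.pyIdx?]
  have hinit : (Matrix.headD []).map (fun _ => ([0, 0] : List Int))
      = (List.range (Matrix.headD []).length).map
          (fun (j : Nat) => [((fun _ : Nat => ((0 : Int), (0 : Int))) j).1,
                            ((fun _ : Nat => ((0 : Int), (0 : Int))) j).2]) := by
    simp
  rw [a_char, hhead, hinit,
    b_inv Matrix (Matrix.headD []).length hlen (fun _ => ((0 : Int), (0 : Int)))]
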